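-- pv_equiv track=rewrite | github.com/mstaal/AoC | 2020/dec11.py | get_indices_2
-- ===== SOURCE A (Python) =====
-- def get_indices_2(i, j, m, n):
--     right = [(i, j + idx) for idx in range(1, n - j)]
--     left = [(i, j - idx) for idx in range(1, j + 1)]
--     down = [(i + idx, j) for idx in range(1, m - i)]
--     up = [(i - idx, j) for idx in range(1, i + 1)]
--     diagrightup = [(i - idx, j + idx) for idx in range(1, max(n, m)) if i - idx >= 0 and 0 <= j + idx < n]
--     diagrightdown = [(i + idx, j + idx) for idx in range(1, max(n, m)) if i + idx < m and 0 <= j + idx < n]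
--     diagleftup = [(i - idx, j - idx) for idx in range(1, max(n, m)) if i - idx >= 0 and j - idx >= 0]
--     diagleftdown = [(i + idx, j - idx) for idx in range(1, max(n, m)) if 0 <= i + idx < m and j - idx >= 0]
--     adjacent_indices = [right, left, down, up, diagrightup, diagrightdown, diagleftup, diagleftdown]
--     return adjacent_indices
-- ===== SOURCE B (Python) =====
-- def get_indices_2(i, j, m, n):
--     # One sweep over the step distance idx, filling all eight rays at once.
--     # Straight rays extend while idx stays short of their edge distance;
--     # diagonal cells are scanned up to the grid diagonal max(n, m) and kept
--     # while both coordinates are valid.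
--     rays = [[], [], [], [], [], [], [], []]
--     diag = max(n, m)
--     sweep = max(n - j, j + 1, m - i, i + 1, diag)
--     for idx in range(1, sweep):
--         if idx < n - j:
--             rays[0].append((i, j + idx))
--         if idx < j + 1:
--             rays[1].append((i, j - idx))
--         if idx < m - i:
--             rays[2].append((i + idx, j))
--         if idx < i + 1:
--             rays[3].append((i - idx, j))
--         if idx < diag:
--             if i - idx >= 0 and 0 <= j + idx < n:
--                 rays[4].append((i - idx, j + idx))
--             if i + idx < m and 0 <= j + idx < n:
--                 rays[5].append((i + idx, j + idx))
--             if i - idx >= 0 and j - idx >= 0: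
--                 rays[6].append((i - idx, j - idx))
--             if 0 <= i + idx < m and j - idx >= 0:
--                 rays[7].append((i + idx, j - idx))
--     return rays
-- ===== Notes on version B (the rewrite author's own statement) =====
-- stated objective: alternative
-- what changed: Fuses A's eight independent per-direction comprehensions (each with its own range or filtered scan) into a single sweep over the step distance idx that fills all eight ray accumulators simultaneously in one pass.
import Mathlib
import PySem

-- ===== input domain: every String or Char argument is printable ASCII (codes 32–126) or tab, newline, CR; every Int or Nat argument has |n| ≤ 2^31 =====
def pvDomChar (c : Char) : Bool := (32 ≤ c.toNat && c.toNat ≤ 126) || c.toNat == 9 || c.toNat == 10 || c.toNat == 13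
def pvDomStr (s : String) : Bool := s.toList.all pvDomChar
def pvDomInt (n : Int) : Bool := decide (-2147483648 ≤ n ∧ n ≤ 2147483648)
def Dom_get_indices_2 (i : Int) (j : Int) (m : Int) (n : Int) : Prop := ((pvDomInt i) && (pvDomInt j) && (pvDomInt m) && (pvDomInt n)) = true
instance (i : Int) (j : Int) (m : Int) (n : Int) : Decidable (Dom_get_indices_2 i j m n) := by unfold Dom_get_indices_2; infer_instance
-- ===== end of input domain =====

-- B fuses A's eight per-direction comprehensions into a single sweep over the step
-- distance with eight ray accumulators filled in one pass; proved equal to A on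
-- every input (no precondition).


-- ===== PORT A =====
def get_indices_2 (i : Int) (j : Int) (m : Int) (n : Int) : List (List (Int × Int)) :=
  let right := (PySem.List.pyRange 1 (n - j) 1).map (fun idx => (i, j + idx))
  let left := (PySem.List.pyRange 1 (j + 1) 1).map (fun idx => (i, j - idx))
  let down := (PySem.List.pyRange 1 (m - i) 1).map (fun idx => (i + idx, j))
  let up := (PySem.List.pyRange 1 (i + 1) 1).map (fun idx => (i - idx, j))
  let diagrightup := ((PySem.List.pyRange 1 (max n m) 1).filter
      (fun idx => decide (0 ≤ i - idx) && (decide (0 ≤ j + idx) && decide (j + idx < n)))).map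
      (fun idx => (i - idx, j + idx))
  let diagrightdown := ((PySem.List.pyRange 1 (max n m) 1).filter
      (fun idx => decide (i + idx < m) && (decide (0 ≤ j + idx) && decide (j + idx < n)))).map
      (fun idx => (i + idx, j + idx))
  let diagleftup := ((PySem.List.pyRange 1 (max n m) 1).filter
      (fun idx => decide (0 ≤ i - idx) && decide (0 ≤ j - idx))).map
      (fun idx => (i - idx, j - idx))
  let diagleftdown := ((PySem.List.pyRange 1 (max n m) 1).filter
      (fun idx => (decide (0 ≤ i + idx) && decide (i + idx < m)) && decide (0 ≤ j - idx))).map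
      (fun idx => (i + idx, j - idx))
  [right, left, down, up, diagrightup, diagrightdown, diagleftup, diagleftdown]

-- ===== PORT B =====
-- the state of Source B's loop: the eight ray accumulators rays[0] … rays[7]
abbrev RaysState : Type :=
  List (Int × Int) × List (Int × Int) × List (Int × Int) × List (Int × Int) ×
  List (Int × Int) × List (Int × Int) × List (Int × Int) × List (Int × Int)

-- one iteration of Source B's sweep: conditionally extend each of the eight rays
def sweepStep (i : Int) (j : Int) (m : Int) (n : Int) (diag : Int)
    (st : RaysState) (idx : Int) : RaysState :=
  (if idx < n - j then st.1 ++ [(i, j + idx)] else st.1,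
   if idx < j + 1 then st.2.1 ++ [(i, j - idx)] else st.2.1,
   if idx < m - i then st.2.2.1 ++ [(i + idx, j)] else st.2.2.1,
   if idx < i + 1 then st.2.2.2.1 ++ [(i - idx, j)] else st.2.2.2.1,
   if idx < diag then
     (if 0 ≤ i - idx ∧ (0 ≤ j + idx ∧ j + idx < n) then st.2.2.2.2.1 ++ [(i - idx, j + idx)]
      else st.2.2.2.2.1)
   else st.2.2.2.2.1,
   if idx < diag then
     (if i + idx < m ∧ (0 ≤ j + idx ∧ j + idx < n) then st.2.2.2.2.2.1 ++ [(i + idx, j + idx)]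
      else st.2.2.2.2.2.1)
   else st.2.2.2.2.2.1,
   if idx < diag then
     (if 0 ≤ i - idx ∧ 0 ≤ j - idx then st.2.2.2.2.2.2.1 ++ [(i - idx, j - idx)]
      else st.2.2.2.2.2.2.1)
   else st.2.2.2.2.2.2.1,
   if idx < diag then
     (if (0 ≤ i + idx ∧ i + idx < m) ∧ 0 ≤ j - idx then st.2.2.2.2.2.2.2 ++ [(i + idx, j - idx)]
      else st.2.2.2.2.2.2.2)
   else st.2.2.2.2.2.2.2)

def get_indices_2_alt (i : Int) (j : Int) (m : Int) (n : Int) : List (List (Int × Int)) :=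
  let diag := max n m
  let sweep := max (max (max (max (n - j) (j + 1)) (m - i)) (i + 1)) diag
  let st := (PySem.List.pyRange 1 sweep 1).foldl (sweepStep i j m n diag)
    ([], [], [], [], [], [], [], [])
  [st.1, st.2.1, st.2.2.1, st.2.2.2.1, st.2.2.2.2.1, st.2.2.2.2.2.1,
   st.2.2.2.2.2.2.1, st.2.2.2.2.2.2.2]

-- ===== PRECONDITION & SPEC =====
def Spec_get_indices_2 (i : Int) (j : Int) (m : Int) (n : Int) (out : List (List (Int × Int))) : Prop := out = get_indices_2_alt i j m n
instance (i : Int) (j : Int) (m : Int) (n : Int) (out : List (List (Int × Int))) : Decidable (Spec_get_indices_2 i j m n out) := by unfold Spec_get_indices_2; infer_instance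

-- ===== CLAIM (what is proved, stated in full; the proofs are below) =====
def Claim_equal_get_indices_2 : Prop := ∀ (i : Int) (j : Int) (m : Int) (n : Int), Dom_get_indices_2 i j m n → Spec_get_indices_2 i j m n (get_indices_2 i j m n)

-- ===== LEMMAS AND PROOFS =====

-- the fused fold over the 8-tuple state splits into eight independent folds
lemma sweep_split (i j m n diag : Int) (l : List Int)
    (a0 a1 a2 a3 a4 a5 a6 a7 : List (Int × Int)) :
    l.foldl (sweepStep i j m n diag) (a0, a1, a2, a3, a4, a5, a6, a7)
      = (l.foldl (fun acc idx => if idx < n - j then acc ++ [(i, j + idx)] else acc) a0,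
         l.foldl (fun acc idx => if idx < j + 1 then acc ++ [(i, j - idx)] else acc) a1,
         l.foldl (fun acc idx => if idx < m - i then acc ++ [(i + idx, j)] else acc) a2,
         l.foldl (fun acc idx => if idx < i + 1 then acc ++ [(i - idx, j)] else acc) a3,
         l.foldl (fun acc idx => if idx < diag then
             (if 0 ≤ i - idx ∧ (0 ≤ j + idx ∧ j + idx < n) then acc ++ [(i - idx, j + idx)] else acc)
           else acc) a4,
         l.foldl (fun acc idx => if idx < diag then
             (if i + idx < m ∧ (0 ≤ j + idx ∧ j + idx < n) then acc ++ [(i + idx, j + idx)] else acc)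
           else acc) a5,
         l.foldl (fun acc idx => if idx < diag then
             (if 0 ≤ i - idx ∧ 0 ≤ j - idx then acc ++ [(i - idx, j - idx)] else acc)
           else acc) a6,
         l.foldl (fun acc idx => if idx < diag then
             (if (0 ≤ i + idx ∧ i + idx < m) ∧ 0 ≤ j - idx then acc ++ [(i + idx, j - idx)] else acc)
           else acc) a7) := by
  induction l generalizing a0 a1 a2 a3 a4 a5 a6 a7 with
  | nil => rfl
  | cons x xs ih =>
    simp only [List.foldl_cons]
    exact ih _ _ _ _ _ _ _ _

-- 'if p(x): out.append(f(x))' over a list is a filtered map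
lemma foldl_ite_append (P : Int → Prop) [DecidablePred P] (f : Int → Int × Int)
    (l : List Int) (a : List (Int × Int)) :
    l.foldl (fun acc x => if P x then acc ++ [f x] else acc) a
      = a ++ (l.filter (fun x => decide (P x))).map f := by
  induction l generalizing a with
  | nil => simp
  | cons x xs ih =>
    simp only [List.foldl_cons, List.filter_cons]
    by_cases hP : P x <;>
      simp [hP, ih, List.append_assoc]

-- the nested guard of the diagonal branches, in the same shape
lemma foldl_ite_ite_append (P Q : Int → Prop) [DecidablePred P] [DecidablePred Q]
    (f : Int → Int × Int) (l : List Int) (a : List (Int × Int)) :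
    l.foldl (fun acc x => if P x then (if Q x then acc ++ [f x] else acc) else acc) a
      = a ++ (l.filter (fun x => decide (P x) && decide (Q x))).map f := by
  induction l generalizing a with
  | nil => simp
  | cons x xs ih =>
    simp only [List.foldl_cons, List.filter_cons]
    by_cases hP : P x <;> by_cases hQ : Q x <;>
      simp [hP, hQ, ih, List.append_assoc]

-- an interval-shaped filter on pyRange 1 M is the pyRange of the interval
lemma filter_pyRange_interval (M lo hi : Int) (p : Int → Bool)
    (hlo : 1 ≤ lo) (hhi : hi ≤ M - 1)
    (hp : ∀ x : Int, 1 ≤ x → x < M → p x = decide (lo ≤ x ∧ x ≤ hi)) :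
    (PySem.List.pyRange 1 M 1).filter p = PySem.List.pyRange lo (hi + 1) 1 := by
  rcases le_or_gt lo (hi + 1) with hle | hgt
  · have hloM : lo ≤ M := by omega
    rw [PySem.List.pyRange_one_append 1 lo M hlo hloM,
        PySem.List.pyRange_one_append lo (hi + 1) M hle (by omega),
        List.filter_append, List.filter_append]
    have h1 : (PySem.List.pyRange 1 lo 1).filter p = [] := by
      apply List.filter_eq_nil_iff.mpr
      intro x hx
      obtain ⟨hx1, hx2⟩ := PySem.List.mem_pyRange_one.mp hx
      rw [hp x hx1 (by omega)]
      simp only [decide_eq_true_eq]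
      omega
    have h2 : (PySem.List.pyRange lo (hi + 1) 1).filter p = PySem.List.pyRange lo (hi + 1) 1 := by
      apply List.filter_eq_self.mpr
      intro x hx
      obtain ⟨hx1, hx2⟩ := PySem.List.mem_pyRange_one.mp hx
      rw [hp x (by omega) (by omega)]
      simp only [decide_eq_true_eq]
      omega
    have h3 : (PySem.List.pyRange (hi + 1) M 1).filter p = [] := by
      apply List.filter_eq_nil_iff.mpr
      intro x hx
      obtain ⟨hx1, hx2⟩ := PySem.List.mem_pyRange_one.mp hx
      rw [hp x (by omega) hx2]
      simp only [decide_eq_true_eq]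
      omega
    rw [h1, h2, h3, List.nil_append, List.append_nil]
  · rw [show PySem.List.pyRange lo (hi + 1) 1 = [] from PySem.List.pyRange_one_eq_nil (by omega)]
    apply List.filter_eq_nil_iff.mpr
    intro x hx
    obtain ⟨hx1, hx2⟩ := PySem.List.mem_pyRange_one.mp hx
    rw [hp x hx1 hx2]
    simp only [decide_eq_true_eq]
    omega

-- keeping x < c on a scan to M ≥ c is scanning to c
lemma filter_lt_all (M c : Int) (hc : c ≤ M) :
    (PySem.List.pyRange 1 M 1).filter (fun x => decide (x < c)) = PySem.List.pyRange 1 c 1 := by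
  have h := filter_pyRange_interval M 1 (c - 1) (fun x => decide (x < c)) le_rfl (by omega)
    (by intro x hx1 hx2; simp only [decide_eq_decide]; omega)
  rw [show c - 1 + 1 = c by ring] at h
  exact h

-- a conjoined x < c cut on a scan to M ≥ c is a scan to c
lemma filter_lt_cut (M c : Int) (hc : c ≤ M) (p : Int → Bool) :
    (PySem.List.pyRange 1 M 1).filter (fun x => decide (x < c) && p x)
      = (PySem.List.pyRange 1 c 1).filter p := by
  rcases le_or_gt 1 c with h1 | h1
  · rw [PySem.List.pyRange_one_append 1 c M h1 hc, List.filter_append]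
    have hright : (PySem.List.pyRange c M 1).filter (fun x => decide (x < c) && p x) = [] := by
      apply List.filter_eq_nil_iff.mpr
      intro x hx
      obtain ⟨hx1, hx2⟩ := PySem.List.mem_pyRange_one.mp hx
      simp only [Bool.and_eq_true, decide_eq_true_eq]
      intro h
      omega
    have hleft : (PySem.List.pyRange 1 c 1).filter (fun x => decide (x < c) && p x)
        = (PySem.List.pyRange 1 c 1).filter p := by
      apply List.filter_congr
      intro x hx
      obtain ⟨hx1, hx2⟩ := PySem.List.mem_pyRange_one.mp hx
      simp [hx2]
    rw [hright, hleft, List.append_nil]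
  · rw [show PySem.List.pyRange 1 c 1 = [] from PySem.List.pyRange_one_eq_nil (by omega),
        List.filter_nil]
    apply List.filter_eq_nil_iff.mpr
    intro x hx
    obtain ⟨hx1, hx2⟩ := PySem.List.mem_pyRange_one.mp hx
    simp only [Bool.and_eq_true, decide_eq_true_eq]
    intro h
    omega

-- ===== VERDICT (by name: the statement is the Claim_ definition above) =====
theorem get_indices_2_spec : Claim_equal_get_indices_2 := by
  intro i j m n _
  show get_indices_2 i j m n = get_indices_2_alt i j m n
  simp only [get_indices_2, get_indices_2_alt]
  rw [sweep_split]
  rw [foldl_ite_append (fun idx => idx < n - j) (fun idx => (i, j + idx)),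
      foldl_ite_append (fun idx => idx < j + 1) (fun idx => (i, j - idx)),
      foldl_ite_append (fun idx => idx < m - i) (fun idx => (i + idx, j)),
      foldl_ite_append (fun idx => idx < i + 1) (fun idx => (i - idx, j)),
      foldl_ite_ite_append (fun idx => idx < max n m)
        (fun idx => 0 ≤ i - idx ∧ (0 ≤ j + idx ∧ j + idx < n)) (fun idx => (i - idx, j + idx)),
      foldl_ite_ite_append (fun idx => idx < max n m)
        (fun idx => i + idx < m ∧ (0 ≤ j + idx ∧ j + idx < n)) (fun idx => (i + idx, j + idx)),
      foldl_ite_ite_append (fun idx => idx < max n m)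
        (fun idx => 0 ≤ i - idx ∧ 0 ≤ j - idx) (fun idx => (i - idx, j - idx)),
      foldl_ite_ite_append (fun idx => idx < max n m)
        (fun idx => (0 ≤ i + idx ∧ i + idx < m) ∧ 0 ≤ j - idx) (fun idx => (i + idx, j - idx))]
  rw [filter_lt_all _ (n - j) (by omega),
      filter_lt_all _ (j + 1) (by omega),
      filter_lt_all _ (m - i) (by omega),
      filter_lt_all _ (i + 1) (by omega),
      filter_lt_cut _ (max n m) (by omega),
      filter_lt_cut _ (max n m) (by omega),
      filter_lt_cut _ (max n m) (by omega),
      filter_lt_cut _ (max n m) (by omega)]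
  simp only [Bool.decide_and, List.nil_append]
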